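-- pv_equiv track=rewrite | github.com/insiya2414/DataLemur_SQL-Data-Interview-Questions | Python/Medium/Data Conference Attendees.py | min_attendees
-- ===== SOURCE A (Python) =====
-- import math
--
-- def min_attendees(answers):
--     frequency = {}
--     attendance = 0
--
--     # Count how many times each answer appears
--     for ans in answers:
--         if ans in frequency:
--             frequency[ans] += 1
--         else:
--             frequency[ans] = 1
--
--     for ans in frequency:
--         # Calculate the number of full groups for this answer
--         batches = math.ceil(frequency[ans] / (ans + 1))
--         # Each group has ans + 1 people
--         attendance += batches * (ans + 1)
--
--     return attendance
-- ===== SOURCE B (Python) =====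
-- import math
--
-- def min_attendees(answers):
--     # Sort, then scan consecutive runs of equal answers (no dict/counter pass).
--     s = sorted(answers)
--     total = 0
--     i = 0
--     n = len(s)
--     while i < n:
--         j = i + 1
--         while j < n and s[j] == s[i]:
--             j += 1
--         ans = s[i]
--         total += math.ceil((j - i) / (ans + 1)) * (ans + 1)
--         i = j
--     return total
-- ===== Notes on version B (the rewrite author's own statement) =====
-- stated objective: alternative
-- what changed: Replaced the dict-based frequency count plus key iteration with a sort-then-scan over consecutive runs of equal answers, accumulating the batch-rounded size of each run.
import Mathlib
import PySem

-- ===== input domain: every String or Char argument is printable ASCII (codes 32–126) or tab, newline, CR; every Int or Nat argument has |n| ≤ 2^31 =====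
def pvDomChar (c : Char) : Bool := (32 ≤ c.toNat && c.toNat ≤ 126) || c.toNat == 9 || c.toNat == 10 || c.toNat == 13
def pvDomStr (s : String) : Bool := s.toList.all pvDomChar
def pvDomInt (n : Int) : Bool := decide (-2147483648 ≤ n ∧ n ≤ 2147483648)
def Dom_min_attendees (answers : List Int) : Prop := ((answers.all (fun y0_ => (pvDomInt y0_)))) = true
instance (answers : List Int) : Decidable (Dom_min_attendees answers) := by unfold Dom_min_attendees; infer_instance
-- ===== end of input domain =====

-- B differs from A: sort + single scan over runs of equal answers instead of a dict frequency pass.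
-- Equivalence is about the RETURN value; neither version mutates its argument.

-- ===== PORT A =====
-- math.ceil(freq/(ans+1)) is ported exactly as -((-freq) // (ans+1)); on the admitted
-- magnitudes (freq ≤ list length, |ans| ≤ 2^31) Python's float division rounds so that
-- math.ceil of it equals this exact ceiling. frequency[ans] with the key present is getD 0.
def min_attendees (answers : List Int) : Int :=
  let frequency := answers.foldl
    (fun d ans => if d.contains ans then d.insert ans (d.getD ans 0 + 1) else d.insert ans 1)
    (PySem.Dict.empty)
  frequency.keys.foldl
    (fun attendance ans =>
      attendance + (-(PySem.Int.floordiv (-(frequency.getD ans 0)) (ans + 1))) * (ans + 1))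
    0

-- ===== PORT B =====
-- Source B's outer while loop over the sorted list: each step consumes one run of equal
-- values (the inner 'while s[j] == s[i]' = takeWhile/dropWhile) and adds its batch-rounded size.
def pvRunLoop (total : Int) : List Int → Int
  | [] => total
  | x :: xs =>
      pvRunLoop
        (total + (-(PySem.Int.floordiv (-(1 + ((xs.takeWhile (fun y => y == x)).length : Int))) (x + 1))) * (x + 1))
        (xs.dropWhile (fun y => y == x))
  termination_by l => l.length
  decreasing_by
    simpa using Nat.lt_succ_of_le (List.length_dropWhile_le (fun y => y == x) xs)

def min_attendees_alt (answers : List Int) : Int :=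
  pvRunLoop 0 (PySem.List.sorted answers (fun x => x) false)

-- ===== PRECONDITION & SPEC =====
-- Pre_ excludes lists containing -1: there Python A raises ZeroDivisionError (freq/(ans+1) with
-- ans+1 = 0), and B raises the same.
def Pre_min_attendees (answers : List Int) : Prop := (-1 : Int) ∉ answers
instance (answers : List Int) : Decidable (Pre_min_attendees answers) := by
  unfold Pre_min_attendees; infer_instance
def pvWitness_min_attendees : List Int := [0, 1, 1, 3]

def Spec_min_attendees (answers : List Int) (out : Int) : Prop := out = min_attendees_alt answers
instance (answers : List Int) (out : Int) : Decidable (Spec_min_attendees answers out) := by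
  unfold Spec_min_attendees; infer_instance

-- ===== CLAIM (what is proved, stated in full; the proofs are below) =====
def Claim_equal_min_attendees : Prop := ∀ (answers : List Int), Dom_min_attendees answers → Pre_min_attendees answers → Spec_min_attendees answers (min_attendees answers)

-- ===== LEMMAS AND PROOFS =====

-- the per-value contribution: ceil(cnt/(v+1)) * (v+1)
def pvG (cnt v : Int) : Int := (-(PySem.Int.floordiv (-cnt) (v + 1))) * (v + 1)

-- the heads of the runs pvRunLoop consumes
def pvRunHeads : List Int → List Int
  | [] => []
  | x :: xs => x :: pvRunHeads (xs.dropWhile (fun y => y == x))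
  termination_by l => l.length
  decreasing_by
    simpa using Nat.lt_succ_of_le (List.length_dropWhile_le (fun y => y == x) xs)

theorem pv_foldl_add_map (f : Int → Int) :
    ∀ (l : List Int) (a : Int), l.foldl (fun acc v => acc + f v) a = a + (l.map f).sum := by
  intro l
  induction l with
  | nil => simp
  | cons x xs ih => intro a; simp [List.foldl_cons, ih]; ring

theorem pv_A_eq_sum (answers : List Int) :
    min_attendees answers
      = ((PySem.List.dedup answers).map (fun v => pvG (answers.count v) v)).sum := by
  have hstep :
      (fun (d : PySem.Dict Int Int) ans =>
          if d.contains ans then d.insert ans (d.getD ans 0 + 1) else d.insert ans 1)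
        = (fun d ans => d.insert ans (d.getD ans 0 + 1)) := by
    funext d ans
    by_cases h : d.contains ans
    · simp [h]
    · have : d.get? ans = none := by
        simpa [PySem.Dict.get?_eq_none_iff_contains] using h
      simp [h, PySem.Dict.getD, this]
  unfold min_attendees
  rw [hstep, PySem.Dict.foldl_insert_getD_add_one_eq_counter]
  have hd : PySem.Set.ofList answers = PySem.List.dedup answers := by
    simp [PySem.List.dedup_eq_ofList]
  simp only [PySem.Dict.keys_counter, PySem.Dict.getD_counter, hd]
  simpa [pvG] using
    pv_foldl_add_map (fun v => pvG ((answers.count v : Int)) v) (PySem.List.dedup answers) 0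

theorem pv_runHeads_mem {s : List Int} {v : Int} (h : v ∈ pvRunHeads s) : v ∈ s := by
  induction s using pvRunHeads.induct with
  | case1 => simp [pvRunHeads] at h
  | case2 x xs ih =>
    rw [pvRunHeads] at h
    rcases List.mem_cons.mp h with h | h
    · simp [h]
    · exact List.mem_cons_of_mem _ (List.dropWhile_sublist _ |>.subset (ih h))

theorem pv_sorted_head_not_mem_rest {x : Int} {xs : List Int}
    (hp : (x :: xs).Pairwise (· ≤ ·)) :
    x ∉ xs.dropWhile (fun y => y == x) := by
  intro hmem
  cases hrest : xs.dropWhile (fun y => y == x) with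
  | nil => simp [hrest] at hmem
  | cons r t =>
    have hrx : ¬ (r == x) = true := by
      have := List.head?_dropWhile_not (fun y => y == x) xs
      rw [hrest] at this
      simpa using this
    have hrne : r ≠ x := by simpa using hrx
    have hsub : (r :: t).Sublist xs := by
      rw [← hrest]; exact List.dropWhile_sublist _
    have hxle : ∀ y ∈ xs, x ≤ y := fun y hy => (List.pairwise_cons.mp hp).1 y hy
    have hxr : x < r := lt_of_le_of_ne (hxle r (hsub.subset (List.mem_cons_self ..)))
      (fun h => hrne h.symm)
    have hpxs : xs.Pairwise (· ≤ ·) := (List.pairwise_cons.mp hp).2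
    have hprt : (r :: t).Pairwise (· ≤ ·) := hpxs.sublist hsub
    rw [hrest] at hmem
    rcases List.mem_cons.mp hmem with h | h
    · exact hrne h.symm
    · have := (List.pairwise_cons.mp hprt).1 x h
      omega

theorem pv_count_head {x : Int} {xs : List Int} (hp : (x :: xs).Pairwise (· ≤ ·)) :
    (x :: xs).count x = 1 + (xs.takeWhile (fun y => y == x)).length := by
  have hsplit := List.takeWhile_append_dropWhile (p := fun y => y == x) (l := xs)
  have hrun : ∀ y ∈ xs.takeWhile (fun y => y == x), y = x := by
    intro y hy
    have := List.mem_takeWhile_imp hy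
    simpa using this
  have hcount_run : (xs.takeWhile (fun y => y == x)).count x
      = (xs.takeWhile (fun y => y == x)).length := by
    apply List.count_eq_length.mpr
    intro y hy; exact ((hrun y hy) ▸ rfl)
  have hcount_rest : (xs.dropWhile (fun y => y == x)).count x = 0 :=
    List.count_eq_zero.mpr (pv_sorted_head_not_mem_rest hp)
  calc (x :: xs).count x = xs.count x + 1 := by simp
    _ = ((xs.takeWhile (fun y => y == x)) ++ (xs.dropWhile (fun y => y == x))).count x + 1 := by
          rw [hsplit]
    _ = 1 + (xs.takeWhile (fun y => y == x)).length := by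
          rw [List.count_append, hcount_run, hcount_rest]; omega

theorem pv_count_rest {x v : Int} {xs : List Int} (hne : v ≠ x) :
    (x :: xs).count v = (xs.dropWhile (fun y => y == x)).count v := by
  have hsplit := List.takeWhile_append_dropWhile (p := fun y => y == x) (l := xs)
  have hrun0 : (xs.takeWhile (fun y => y == x)).count v = 0 := by
    apply List.count_eq_zero.mpr
    intro hv
    exact hne (by simpa using List.mem_takeWhile_imp hv)
  calc (x :: xs).count v = xs.count v := by simp [Ne.symm hne]
    _ = ((xs.takeWhile (fun y => y == x)) ++ (xs.dropWhile (fun y => y == x))).count v := by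
          rw [hsplit]
    _ = (xs.dropWhile (fun y => y == x)).count v := by
          rw [List.count_append, hrun0]; omega

theorem pv_runLoop_eq_sum :
    ∀ (s : List Int), s.Pairwise (· ≤ ·) → ∀ (a : Int),
      pvRunLoop a s = a + ((pvRunHeads s).map (fun v => pvG (s.count v) v)).sum := by
  intro s
  induction s using pvRunHeads.induct with
  | case1 => intro _ a; simp [pvRunLoop, pvRunHeads]
  | case2 x xs ih =>
    intro hp a
    have hpxs : xs.Pairwise (· ≤ ·) := (List.pairwise_cons.mp hp).2
    have hprest : (xs.dropWhile (fun y => y == x)).Pairwise (· ≤ ·) :=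
      hpxs.sublist (List.dropWhile_sublist _)
    rw [pvRunLoop, pvRunHeads, ih hprest]
    have hhead : ((x :: xs).count x : Int)
        = 1 + ((xs.takeWhile (fun y => y == x)).length : Int) := by
      rw [pv_count_head hp]; push_cast; ring
    have hmapEq :
        (pvRunHeads (xs.dropWhile (fun y => y == x))).map
            (fun v => pvG (((xs.dropWhile (fun y => y == x)).count v : Int)) v)
          = (pvRunHeads (xs.dropWhile (fun y => y == x))).map
            (fun v => pvG (((x :: xs).count v : Int)) v) := by
      apply List.map_congr_left
      intro v hv
      have hvrest : v ∈ xs.dropWhile (fun y => y == x) := pv_runHeads_mem hv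
      have hvne : v ≠ x := by
        intro h; exact pv_sorted_head_not_mem_rest hp (h ▸ hvrest)
      rw [pv_count_rest hvne]
    rw [hmapEq]
    simp only [List.map_cons, List.sum_cons, pvG, hhead]
    ring

theorem pv_runHeads_nodup : ∀ (s : List Int), s.Pairwise (· ≤ ·) → (pvRunHeads s).Nodup := by
  intro s
  induction s using pvRunHeads.induct with
  | case1 => intro _; simp [pvRunHeads]
  | case2 x xs ih =>
    intro hp
    have hpxs : xs.Pairwise (· ≤ ·) := (List.pairwise_cons.mp hp).2
    have hprest : (xs.dropWhile (fun y => y == x)).Pairwise (· ≤ ·) :=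
      hpxs.sublist (List.dropWhile_sublist _)
    rw [pvRunHeads]
    refine List.nodup_cons.mpr ⟨?_, ih hprest⟩
    intro hx
    exact pv_sorted_head_not_mem_rest hp (pv_runHeads_mem hx)

theorem pv_mem_runHeads : ∀ (s : List Int), ∀ v ∈ s, v ∈ pvRunHeads s := by
  intro s
  induction s using pvRunHeads.induct with
  | case1 => intro v hv; simp at hv
  | case2 x xs ih =>
    intro v hv
    rw [pvRunHeads]
    rcases List.mem_cons.mp hv with h | h
    · exact h ▸ List.mem_cons_self ..
    · by_cases hvx : v = x
      · exact hvx ▸ List.mem_cons_self ..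
      · have hsplit := List.takeWhile_append_dropWhile (p := fun y => y == x) (l := xs)
        rw [← hsplit] at h
        rcases List.mem_append.mp h with h | h
        · exact absurd (by simpa using List.mem_takeWhile_imp h) hvx
        · exact List.mem_cons_of_mem _ (ih v h)

-- ===== VERDICT (by name: the statement is the Claim_ definition above) =====
theorem min_attendees_spec : Claim_equal_min_attendees := by
  intro answers _ _
  unfold Spec_min_attendees
  set s := PySem.List.sorted answers (fun x => x) false with hs
  have hperm : s.Perm answers := PySem.List.sorted_perm ..
  have hpair : s.Pairwise (· ≤ ·) := by
    simpa using PySem.List.sorted_pairwise answers (fun x => x)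
  have hB : min_attendees_alt answers
      = ((pvRunHeads s).map (fun v => pvG ((s.count v : Int)) v)).sum := by
    unfold min_attendees_alt
    rw [← hs, pv_runLoop_eq_sum s hpair 0]
    ring
  have hcnt : ∀ v : Int, s.count v = answers.count v := fun v => hperm.count_eq v
  have hpermHeads : (PySem.List.dedup answers).Perm (pvRunHeads s) := by
    rw [List.perm_ext_iff_of_nodup (PySem.List.nodup_dedup answers) (pv_runHeads_nodup s hpair)]
    intro v
    constructor
    · intro hv
      exact pv_mem_runHeads s v (hperm.mem_iff.mpr ((PySem.List.mem_dedup ..).mp hv))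
    · intro hv
      exact (PySem.List.mem_dedup ..).mpr (hperm.mem_iff.mp (pv_runHeads_mem hv))
  rw [pv_A_eq_sum, hB]
  have := (hpermHeads.map (fun v => pvG ((answers.count v : Int)) v)).sum_eq
  rw [this]
  congr 1
  apply List.map_congr_left
  intro v _
  rw [hcnt v]
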